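-- pv_equiv track=rewrite | github.com/zeunala/ProblemSolving | BOJ/2022.07-2022.09/S5_3711.py | checkDiv
-- ===== SOURCE A (Python) =====
-- def checkDiv(arr, m): # arr 배열에 대해 m으로 나눈 나머지들이 전부 다른지 체크
--     temp = set()
--     for e in arr:
--         if e % m in temp:
--             return False
--         else:
--             temp.add(e % m)
--     return True
-- ===== SOURCE B (Python) =====
-- def checkDiv(arr, m):
--     rems = sorted(e % m for e in arr)
--     for prev, cur in zip(rems, rems[1:]):
--         if prev == cur:
--             return False
--     return True
-- ===== Notes on version B (the rewrite author's own statement) =====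
-- stated objective: alternative
-- what changed: Replaces the running hash-set membership test with a sort of the remainders followed by a single adjacent-pair equality scan over zip(rems, rems[1:]).
import Mathlib
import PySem

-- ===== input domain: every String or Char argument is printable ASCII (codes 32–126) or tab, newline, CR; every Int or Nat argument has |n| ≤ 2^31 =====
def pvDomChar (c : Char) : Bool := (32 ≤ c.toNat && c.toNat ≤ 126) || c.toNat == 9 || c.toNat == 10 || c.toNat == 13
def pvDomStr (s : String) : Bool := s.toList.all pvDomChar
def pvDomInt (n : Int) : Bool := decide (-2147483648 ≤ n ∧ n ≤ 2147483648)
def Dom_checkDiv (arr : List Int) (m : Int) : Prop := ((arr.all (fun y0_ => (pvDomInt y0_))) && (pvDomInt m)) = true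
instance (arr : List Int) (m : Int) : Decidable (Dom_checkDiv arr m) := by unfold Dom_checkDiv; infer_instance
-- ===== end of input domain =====

-- B replaces A's running hash-set membership test by sort-then-adjacent-pair scan (alternative algorithm, same results).


-- ===== PORT A =====
def checkDivLoop (m : Int) (temp : PySem.Set Int) : List Int → Bool
  | [] => true
  | e :: rest =>
    if PySem.Set.contains temp (PySem.Int.mod e m) then false
    else checkDivLoop m (PySem.Set.add temp (PySem.Int.mod e m)) rest

def checkDiv (arr : List Int) (m : Int) : Bool :=
  checkDivLoop m PySem.Set.empty arr

-- ===== PORT B =====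
-- the 'for prev, cur in zip(rems, rems[1:]): …' loop of Source B
def adjScan : List (Int × Int) → Bool
  | [] => true
  | (prev, cur) :: rest => if prev == cur then false else adjScan rest

def checkDiv_alt (arr : List Int) (m : Int) : Bool :=
  let rems := PySem.List.sorted (arr.map (fun e => PySem.Int.mod e m)) (fun x => x) false
  adjScan (rems.zip rems.tail)

-- ===== PRECONDITION & SPEC =====
-- Pre_ excludes exactly m = 0 with a nonempty list, where Python's '%' raises ZeroDivisionError (in A and in B alike).
def Pre_checkDiv (arr : List Int) (m : Int) : Prop := m ≠ 0 ∨ arr = []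
instance (arr : List Int) (m : Int) : Decidable (Pre_checkDiv arr m) := by unfold Pre_checkDiv; infer_instance
def pvWitness_checkDiv : List Int × Int := ([3, 5, 10], 4)

def Spec_checkDiv (arr : List Int) (m : Int) (out : Bool) : Prop := out = checkDiv_alt arr m
instance (arr : List Int) (m : Int) (out : Bool) : Decidable (Spec_checkDiv arr m out) := by unfold Spec_checkDiv; infer_instance

-- ===== CLAIM (what is proved, stated in full; the proofs are below) =====
def Claim_equal_checkDiv : Prop := ∀ (arr : List Int) (m : Int), Dom_checkDiv arr m → Pre_checkDiv arr m → Spec_checkDiv arr m (checkDiv arr m)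

-- ===== LEMMAS AND PROOFS =====

-- A's loop is true iff the remainders are pairwise distinct and none already seen
theorem checkDivLoop_true_iff (m : Int) (l : List Int) (s : PySem.Set Int) :
    checkDivLoop m s l = true ↔
      (l.map (fun e => PySem.Int.mod e m)).Nodup ∧ ∀ e ∈ l, PySem.Int.mod e m ∉ s := by
  induction l generalizing s with
  | nil => simp [checkDivLoop]
  | cons e rest ih =>
    simp only [checkDivLoop]
    split_ifs with hc
    · have hm : PySem.Int.mod e m ∈ s := (PySem.Set.contains_iff s _).mp hc
      simp [hm]
    · have hm : PySem.Int.mod e m ∉ s := fun h => hc ((PySem.Set.contains_iff s _).mpr h)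
      rw [ih]
      simp only [List.map_cons, List.nodup_cons, List.mem_map, List.mem_cons,
        PySem.Set.mem_add, not_or, forall_eq_or_imp]
      constructor
      · rintro ⟨hn, hrest⟩
        exact ⟨⟨fun ⟨x, hx, hxe⟩ => (hrest x hx).2 hxe, hn⟩, hm,
          fun x hx => (hrest x hx).1⟩
      · rintro ⟨⟨hne, hn⟩, _, hrest⟩
        exact ⟨hn, fun x hx => ⟨hrest x hx, fun hfx => hne ⟨x, hx, hfx⟩⟩⟩

-- B's scan over zip(r, r.tail) is exactly the adjacent-distinctness chain
theorem adjScan_true_iff (r : List Int) :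
    adjScan (r.zip r.tail) = true ↔ r.IsChain (· ≠ ·) := by
  induction r with
  | nil => simp [adjScan]
  | cons a t ih =>
    cases t with
    | nil => simp [adjScan]
    | cons b t' =>
      simp only [List.tail_cons, List.zip_cons_cons, adjScan]
      rw [show (b :: t').tail = t' from rfl] at ih
      by_cases h : a = b
      · simp [h, List.isChain_cons_cons]
      · simp only [beq_iff_eq, if_neg h]
        rw [ih, List.isChain_cons_cons]
        tauto

-- on a ≤-sorted list, no adjacent equals ⟺ no duplicates at all
theorem sorted_chain_ne_iff_nodup (r : List Int) (hs : r.Pairwise (· ≤ ·)) :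
    r.IsChain (· ≠ ·) ↔ r.Nodup := by
  constructor
  · intro hc
    have hlt : r.IsChain (· < ·) := by
      have hsc : r.IsChain (· ≤ ·) := hs.isChain
      clear hs
      induction r with
      | nil => exact List.isChain_nil
      | cons a t ih =>
        cases t with
        | nil => exact List.isChain_singleton a
        | cons b t' =>
          rw [List.isChain_cons_cons] at hc hsc ⊢
          exact ⟨lt_of_le_of_ne hsc.1 hc.1, ih hc.2 hsc.2⟩
    exact (List.isChain_iff_pairwise.mp hlt).imp ne_of_lt
  · intro hn
    exact hn.isChain

theorem checkDiv_alt_true_iff (arr : List Int) (m : Int) :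
    checkDiv_alt arr m = true ↔ (arr.map (fun e => PySem.Int.mod e m)).Nodup := by
  unfold checkDiv_alt
  rw [adjScan_true_iff,
    sorted_chain_ne_iff_nodup _
      (by simpa using PySem.List.sorted_pairwise (xs := arr.map (fun e => PySem.Int.mod e m)) (key := fun x => x))]
  exact (PySem.List.sorted_perm (arr.map (fun e => PySem.Int.mod e m)) (fun x => x) false).nodup_iff

-- ===== VERDICT (by name: the statement is the Claim_ definition above) =====
theorem checkDiv_spec : Claim_equal_checkDiv := by
  intro arr m _ _
  unfold Spec_checkDiv
  have hA : checkDiv arr m = true ↔ (arr.map (fun e => PySem.Int.mod e m)).Nodup := by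
    rw [checkDiv, checkDivLoop_true_iff]
    simp [PySem.Set.empty]
  have hB := checkDiv_alt_true_iff arr m
  cases hA' : checkDiv arr m <;> cases hB' : checkDiv_alt arr m <;> simp_all
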